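-- pv_equiv track=rewrite | github.com/ivikasavnish/trademicro | trade_log.py | find_price_position_in_deque
-- ===== SOURCE A (Python) =====
-- from collections import deque, Counter
--
-- def find_price_position_in_deque(priceq, given_price):
--     recent_priceq = deque(list(priceq)[-60:])
--     if len(recent_priceq) < 30:
--         return -1, 0
--     prices_list = list(recent_priceq)
--     price_frequencies = Counter(prices_list)
--     sorted_frequencies = price_frequencies.most_common()
--     for position, (price, frequency) in enumerate(sorted_frequencies, start=1):
--         if price == given_price:
--             return position, frequency
--     return -1, 0
-- ===== SOURCE B (Python) =====
-- def find_price_position_in_deque(priceq, given_price):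
--     recent = list(priceq)[-60:]
--     if len(recent) < 30:
--         return -1, 0
--     freq = {}
--     for p in recent:
--         freq[p] = freq.get(p, 0) + 1
--     f = freq.get(given_price)
--     if f is None:
--         return -1, 0
--     position = 1
--     seen = False
--     for p, c in freq.items():
--         if p == given_price:
--             seen = True
--         elif c > f or (c == f and not seen):
--             position += 1
--     return position, f
-- ===== Notes on version B (the rewrite author's own statement) =====
-- stated objective: alternative
-- what changed: B replaces Counter.most_common()'s sort-and-enumerate scan by a frequency dict built in one pass and a direct rank computation (1 + prices with higher frequency + equal-frequency prices first seen earlier), with no sorting.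
import Mathlib
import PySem

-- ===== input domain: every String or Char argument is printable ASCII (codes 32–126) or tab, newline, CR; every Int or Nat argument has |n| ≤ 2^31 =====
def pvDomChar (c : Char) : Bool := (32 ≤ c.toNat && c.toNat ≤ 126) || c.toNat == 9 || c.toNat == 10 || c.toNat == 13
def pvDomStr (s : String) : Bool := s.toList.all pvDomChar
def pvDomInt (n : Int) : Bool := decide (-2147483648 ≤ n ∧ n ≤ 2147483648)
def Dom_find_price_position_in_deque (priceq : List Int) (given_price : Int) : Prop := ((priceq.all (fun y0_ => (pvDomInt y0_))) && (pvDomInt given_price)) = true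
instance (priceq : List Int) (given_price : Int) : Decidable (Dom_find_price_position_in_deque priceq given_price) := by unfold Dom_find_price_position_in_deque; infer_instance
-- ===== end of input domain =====

-- B replaces A's sort-then-scan over most_common() by a single counting pass over the
-- frequency dict (rank = 1 + #higher-frequency prices + #equal-frequency prices seen earlier).

-- ===== PORT A =====
-- the enumerate-and-return loop over most_common()
def pvScanA (g : Int) : List (Int × Int) → Int → Int × Int
  | [], _ => (-1, 0)
  | (p, f) :: rest, pos => if p == g then (pos, f) else pvScanA g rest (pos + 1)

def find_price_position_in_deque (priceq : List Int) (given_price : Int) : Int × Int :=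
  let recent_priceq := PySem.List.slice priceq (some (-60)) none
  if recent_priceq.length < 30 then (-1, 0)
  else
    let price_frequencies := PySem.Dict.counter recent_priceq
    let sorted_frequencies := PySem.List.sorted price_frequencies.items (fun kv => kv.2) true
    pvScanA given_price sorted_frequencies 1

-- ===== PORT B =====
-- the counting pass over freq.items(): position += 1 for higher counts, and for equal
-- counts not yet past given_price
def pvScanB (g f : Int) : List (Int × Int) → Int → Bool → Int
  | [], pos, _ => pos
  | (p, c) :: rest, pos, seen =>
    if p == g then pvScanB g f rest pos true
    else if f < c || (c == f && !seen) then pvScanB g f rest (pos + 1) seen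
    else pvScanB g f rest pos seen

def find_price_position_in_deque_alt (priceq : List Int) (given_price : Int) : Int × Int :=
  let recent := PySem.List.slice priceq (some (-60)) none
  if recent.length < 30 then (-1, 0)
  else
    let freq := recent.foldl (fun d p => d.insert p (d.getD p 0 + 1)) PySem.Dict.empty
    match freq.get? given_price with
    | none => (-1, 0)
    | some f => (pvScanB given_price f freq.items 1 false, f)

-- ===== PRECONDITION & SPEC =====
def Spec_find_price_position_in_deque (priceq : List Int) (given_price : Int) (out : Int × Int) : Prop := out = find_price_position_in_deque_alt priceq given_price
instance (priceq : List Int) (given_price : Int) (out : Int × Int) : Decidable (Spec_find_price_position_in_deque priceq given_price out) := by unfold Spec_find_price_position_in_deque; infer_instance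

-- ===== CLAIM (what is proved, stated in full; the proofs are below) =====
def Claim_equal_find_price_position_in_deque : Prop := ∀ (priceq : List Int) (given_price : Int), Dom_find_price_position_in_deque priceq given_price → Spec_find_price_position_in_deque priceq given_price (find_price_position_in_deque priceq given_price)

-- ===== LEMMAS AND PROOFS =====

-- insertBy (descending by .2) is a takeWhile/dropWhile split at the insertion point
lemma pv_insertBy_split (x : Int × Int) : ∀ S : List (Int × Int),
    PySem.List.insertBy (fun a b => decide ((b.2 : Int) < a.2)) x S
      = S.takeWhile (fun y => decide (x.2 ≤ y.2)) ++ x :: S.dropWhile (fun y => decide (x.2 ≤ y.2)) := by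
  intro S
  induction S with
  | nil => simp [PySem.List.insertBy]
  | cons y ys ih =>
    by_cases h : (y.2 : Int) < x.2
    · simp [PySem.List.insertBy, h, not_le.mpr h]
    · simp [PySem.List.insertBy, h, not_lt.mp h, ih]

-- on a descending list, the takeWhile-prefix length is the countP
lemma pv_tw_len (x : Int) : ∀ S : List (Int × Int), S.Pairwise (fun a b => b.2 ≤ a.2) →
    (S.takeWhile (fun y => decide (x ≤ y.2))).length = S.countP (fun y => decide (x ≤ y.2)) := by
  intro S
  induction S with
  | nil => simp
  | cons y ys ih =>
    intro hp
    rw [List.pairwise_cons] at hp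
    by_cases h : x ≤ y.2
    · simp [h, ih hp.2]
    · rw [List.takeWhile_cons]
      simp only [h, decide_false, List.countP_cons]
      rw [List.countP_eq_zero.mpr (fun z hz => by
        simp only [decide_eq_true_eq]
        exact fun hc => h (le_trans hc (hp.1 z hz)))]
      simp

lemma pv_tw_app_pos {α : Type} (p : α → Bool) (t : α) (ht : p t = true) :
    ∀ (P Q : List α), (∀ z ∈ P, p z = true) →
      (P ++ t :: Q).takeWhile p = P ++ t :: Q.takeWhile p ∧
      (P ++ t :: Q).dropWhile p = Q.dropWhile p := by
  intro P Q hP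
  induction P with
  | nil => simp [ht]
  | cons a P ih =>
    have ha := hP a (by simp)
    have := ih (fun z hz => hP z (by simp [hz]))
    simp [ha, this.1, this.2]

lemma pv_tw_app_neg {α : Type} (p : α → Bool) (t : α) (ht : p t = false) :
    ∀ (P Q : List α),
      (P ++ t :: Q).takeWhile p = P.takeWhile p ∧
      (P ++ t :: Q).dropWhile p = P.dropWhile p ++ t :: Q := by
  intro P Q
  induction P with
  | nil => simp [ht]
  | cons a P ih =>
    by_cases ha : p a
    · simp [ha, ih.1, ih.2]
    · simp [ha]

lemma pv_countP_split (f : Int) : ∀ xs : List (Int × Int),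
    xs.countP (fun z => decide (f ≤ z.2))
      = xs.countP (fun z => decide (f < z.2)) + xs.countP (fun z => decide (z.2 = f)) := by
  intro xs
  induction xs with
  | nil => simp
  | cons a xs ih =>
    simp only [List.countP_cons, ih]
    rcases lt_trichotomy f a.2 with h | h | h
    · simp [h, le_of_lt h, ne_of_gt h]; omega
    · simp only [h.symm, le_refl, decide_true, lt_self_iff_false, decide_false]
      simp; omega
    · simp [not_le.mpr h, not_lt.mpr (le_of_lt h), ne_of_lt h]

-- stability of the descending sort: position and neighbourhood of the unique item with key t.1
lemma pv_sort_pos (t : Int × Int) : ∀ (Q P : List (Int × Int)),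
    (∀ z ∈ P, z.1 ≠ t.1) → (∀ z ∈ Q, z.1 ≠ t.1) →
    ∃ P' Q', PySem.List.sorted (P ++ t :: Q) (fun z => z.2) true = P' ++ t :: Q' ∧
      (∀ z ∈ P', z.1 ≠ t.1) ∧
      P'.length = (P ++ t :: Q).countP (fun z => decide (t.2 < z.2))
                  + P.countP (fun z => decide (z.2 = t.2)) := by
  intro Q
  induction Q using List.reverseRecOn with
  | nil =>
    intro P hP _
    have hsnoc : PySem.List.sorted (P ++ [t]) (fun z => z.2) true
        = PySem.List.insertBy (fun a b => decide ((b.2 : Int) < a.2)) t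
            (PySem.List.sorted P (fun z => z.2) true) := by
      rw [PySem.List.sorted_rev_eq_foldl_insertBy, PySem.List.sorted_rev_eq_foldl_insertBy,
        List.foldl_append]
      rfl
    set S := PySem.List.sorted P (fun z => z.2) true with hSdef
    refine ⟨S.takeWhile (fun y => decide (t.2 ≤ y.2)), S.dropWhile (fun y => decide (t.2 ≤ y.2)),
      by rw [hsnoc, pv_insertBy_split], ?_, ?_⟩
    · intro z hz
      exact hP z ((PySem.List.mem_sorted P _ true z).mp ((List.takeWhile_sublist _).mem hz))
    · have hpw : S.Pairwise (fun a b => b.2 ≤ a.2) := PySem.List.sorted_pairwise_rev P _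
      rw [pv_tw_len t.2 S hpw, (PySem.List.sorted_perm P (fun z => z.2) true).countP_eq,
        pv_countP_split]
      simp [List.countP_append]
  | append_singleton Q₀ x ih =>
    intro P hP hQ
    have hxt1 : x.1 ≠ t.1 := hQ x (by simp)
    obtain ⟨P', Q'', hS₀, hkeys, hlen⟩ := ih P hP (fun z hz => hQ z (by simp [hz]))
    have hsnoc : PySem.List.sorted (P ++ t :: (Q₀ ++ [x])) (fun z => z.2) true
        = PySem.List.insertBy (fun a b => decide ((b.2 : Int) < a.2)) x
            (PySem.List.sorted (P ++ t :: Q₀) (fun z => z.2) true) := by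
      rw [show P ++ t :: (Q₀ ++ [x]) = (P ++ t :: Q₀) ++ [x] by simp,
        PySem.List.sorted_rev_eq_foldl_insertBy, PySem.List.sorted_rev_eq_foldl_insertBy,
        List.foldl_append]
      rfl
    have hpw : (PySem.List.sorted (P ++ t :: Q₀) (fun z => z.2) true).Pairwise
        (fun a b => b.2 ≤ a.2) := PySem.List.sorted_pairwise_rev _ _
    rw [hS₀] at hpw
    by_cases hxt : x.2 ≤ t.2
    · have hPall : ∀ z ∈ P', (fun y => decide (x.2 ≤ y.2)) z = true := by
        intro z hz
        have ht2 : t.2 ≤ z.2 := (List.pairwise_append.mp hpw).2.2 z hz t (by simp)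
        simp [le_trans hxt ht2]
      obtain ⟨htw, hdw⟩ := pv_tw_app_pos (fun y => decide (x.2 ≤ y.2)) t (by simp [hxt]) P' Q'' hPall
      refine ⟨P', Q''.takeWhile (fun y => decide (x.2 ≤ y.2)) ++ x ::
        Q''.dropWhile (fun y => decide (x.2 ≤ y.2)), ?_, hkeys, ?_⟩
      · rw [hsnoc, pv_insertBy_split, hS₀, htw, hdw]
        simp
      · have hnlt : ¬ t.2 < x.2 := not_lt.mpr hxt
        simp [List.countP_append, hnlt] at hlen ⊢
        omega
    · have hpt : (fun y => decide (x.2 ≤ y.2)) t = false := by simp [hxt]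
      obtain ⟨htw, hdw⟩ := pv_tw_app_neg (fun y => decide (x.2 ≤ y.2)) t hpt P' Q''
      refine ⟨P'.takeWhile (fun y => decide (x.2 ≤ y.2)) ++ x ::
        P'.dropWhile (fun y => decide (x.2 ≤ y.2)), Q'', ?_, ?_, ?_⟩
      · rw [hsnoc, pv_insertBy_split, hS₀, htw, hdw]
        simp
      · intro z hz
        rcases List.mem_append.mp hz with hz | hz
        · exact hkeys z ((List.takeWhile_sublist _).mem hz)
        · rcases List.mem_cons.mp hz with rfl | hz
          · exact hxt1
          · exact hkeys z ((List.dropWhile_sublist _).mem hz)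
      · have hlt : t.2 < x.2 := not_le.mp hxt
        have hsplit : (P'.takeWhile (fun y => decide (x.2 ≤ y.2))).length
            + (P'.dropWhile (fun y => decide (x.2 ≤ y.2))).length = P'.length := by
          rw [← List.length_append, List.takeWhile_append_dropWhile]
        simp [List.countP_append, List.length_append, hlt] at hlen ⊢
        omega

lemma pv_scanA_none (g : Int) : ∀ (S : List (Int × Int)) (pos : Int),
    (∀ z ∈ S, z.1 ≠ g) → pvScanA g S pos = (-1, 0) := by
  intro S
  induction S with
  | nil => intro pos _; rfl
  | cons a S ih =>
    intro pos h
    obtain ⟨p, c⟩ := a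
    have hp : p ≠ g := h (p, c) (by simp)
    simp only [pvScanA, beq_iff_eq, if_neg hp]
    exact ih _ (fun z hz => h z (by simp [hz]))

lemma pv_scanA_skip (g c : Int) : ∀ (P Q : List (Int × Int)) (pos : Int),
    (∀ z ∈ P, z.1 ≠ g) → pvScanA g (P ++ (g, c) :: Q) pos = (pos + P.length, c) := by
  intro P
  induction P with
  | nil => intro Q pos _; simp [pvScanA]
  | cons a P ih =>
    intro Q pos h
    obtain ⟨p, c'⟩ := a
    have hp : p ≠ g := h (p, c') (by simp)
    simp only [List.cons_append, pvScanA, beq_iff_eq, if_neg hp]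
    rw [ih Q (pos + 1) (fun z hz => h z (by simp [hz]))]
    have hl : (((p, c') :: P).length : Int) = (P.length : Int) + 1 := by push_cast [List.length_cons]; ring
    rw [hl, show pos + (((P.length : Int)) + 1) = pos + 1 + (P.length : Int) by ring]

lemma pv_scanB_true (g f : Int) : ∀ (xs : List (Int × Int)) (pos : Int),
    (∀ z ∈ xs, z.1 ≠ g) → pvScanB g f xs pos true = pos + xs.countP (fun z => decide (f < z.2)) := by
  intro xs
  induction xs with
  | nil => intro pos _; simp [pvScanB]
  | cons a xs ih =>
    intro pos h
    obtain ⟨p, c⟩ := a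
    have hp : p ≠ g := h (p, c) (by simp)
    by_cases hc : f < c
    · simp only [pvScanB, beq_iff_eq, if_neg hp, hc, decide_true, Bool.true_or, if_true]
      rw [ih _ (fun z hz => h z (by simp [hz]))]
      simp [hc]; ring
    · have : (decide (f < c) || (c == f && !true)) = false := by simp [hc]
      simp only [pvScanB, beq_iff_eq, if_neg hp, this, Bool.false_eq_true, if_false]
      rw [ih _ (fun z hz => h z (by simp [hz]))]
      simp [hc]

lemma pv_scanB_false (g f : Int) : ∀ (P rest : List (Int × Int)) (pos : Int),
    (∀ z ∈ P, z.1 ≠ g) →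
    pvScanB g f (P ++ rest) pos false
      = pvScanB g f rest (pos + P.countP (fun z => decide (f < z.2)) + P.countP (fun z => decide (z.2 = f))) false := by
  intro P
  induction P with
  | nil => intro rest pos _; simp
  | cons a P ih =>
    intro rest pos h
    obtain ⟨p, c⟩ := a
    have hp : p ≠ g := h (p, c) (by simp)
    rcases lt_trichotomy f c with hc | hc | hc
    · simp only [List.cons_append, pvScanB, beq_iff_eq, if_neg hp, hc, decide_true, Bool.true_or, if_true]
      rw [ih _ _ (fun z hz => h z (by simp [hz]))]
      simp [hc, ne_of_gt hc]
      congr 1; ring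
    · have hb : (decide (f < c) || (c == f && !false)) = true := by simp [hc.symm]
      simp only [List.cons_append, pvScanB, beq_iff_eq, if_neg hp, hb, if_true]
      rw [ih _ _ (fun z hz => h z (by simp [hz]))]
      simp [hc.symm]
      congr 1; ring
    · have hb : (decide (f < c) || (c == f && !false)) = false := by
        simp [not_lt.mpr (le_of_lt hc), ne_of_lt hc]
      simp only [List.cons_append, pvScanB, beq_iff_eq, if_neg hp, hb, Bool.false_eq_true, if_false]
      rw [ih _ _ (fun z hz => h z (by simp [hz]))]
      simp [not_lt.mpr (le_of_lt hc), ne_of_lt hc]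

-- ===== VERDICT (by name: the statement is the Claim_ definition above) =====
theorem find_price_position_in_deque_spec : Claim_equal_find_price_position_in_deque := by
  intro priceq g _
  unfold Spec_find_price_position_in_deque find_price_position_in_deque find_price_position_in_deque_alt
  simp only []
  set R := PySem.List.slice priceq (some (-60)) none with hR
  by_cases h30 : R.length < 30
  · simp [h30]
  · simp only [h30, if_false]
    rw [PySem.Dict.foldl_insert_getD_add_one_eq_counter]
    by_cases hg : g ∈ R
    · -- g occurs: get? = some (count), and the rank formulas agree
      have hsome : (PySem.Dict.counter R).get? g = some ((R.count g : Int)) := by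
        cases hq : (PySem.Dict.counter R).get? g with
        | none =>
          exfalso
          have := (PySem.Dict.get?_eq_none_iff_not_mem_keys _ g).mp hq
          rw [PySem.Dict.keys_counter] at this
          exact this ((PySem.Set.mem_ofList R g).mpr hg)
        | some f =>
          have h1 := PySem.Dict.getD_of_get?_eq_some (PySem.Dict.counter R) (0 : Int) hq
          rw [PySem.Dict.getD_counter] at h1
          rw [h1]
      rw [hsome]
      obtain ⟨ks1, ks2, hks⟩ := List.append_of_mem ((PySem.Set.mem_ofList R g).mpr hg)
      have hnd := PySem.Set.nodup_ofList R
      rw [hks] at hnd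
      have hgs1 : g ∉ ks1 := by
        intro hmem
        exact (List.disjoint_of_nodup_append hnd) hmem (by simp)
      have hgs2 : g ∉ ks2 := by
        have := (List.nodup_append.mp hnd).2.1
        exact (List.nodup_cons.mp this).1
      have hitems : (PySem.Dict.counter R).items
          = (ks1.map (fun k => (k, (R.count k : Int)))) ++ (g, (R.count g : Int)) ::
            (ks2.map (fun k => (k, (R.count k : Int)))) := by
        rw [PySem.Dict.items_counter, hks]
        simp
      have hkP : ∀ z ∈ ks1.map (fun k => (k, (R.count k : Int))), z.1 ≠ (g, (R.count g : Int)).1 := by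
        intro z hz
        obtain ⟨k, hk, rfl⟩ := List.mem_map.mp hz
        show k ≠ g
        intro heq
        exact hgs1 (heq ▸ hk)
      have hkQ : ∀ z ∈ ks2.map (fun k => (k, (R.count k : Int))), z.1 ≠ (g, (R.count g : Int)).1 := by
        intro z hz
        obtain ⟨k, hk, rfl⟩ := List.mem_map.mp hz
        show k ≠ g
        intro heq
        exact hgs2 (heq ▸ hk)
      obtain ⟨P', Q', hS, hk', hlen⟩ := pv_sort_pos (g, (R.count g : Int)) _ _ hkP hkQ
      show _ = (pvScanB g ((R.count g : Nat) : Int) (PySem.Dict.counter R).items 1 false,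
        ((R.count g : Nat) : Int))
      rw [hitems, hS, pv_scanA_skip g (R.count g : Int) P' Q' 1 (fun z hz => hk' z hz),
        pv_scanB_false g (R.count g : Int) _ _ 1 hkP]
      simp only [pvScanB, beq_self_eq_true, if_true]
      rw [pv_scanB_true g (R.count g : Int) _ _ hkQ]
      simp [List.countP_append] at hlen
      simp only [List.countP_map]
      refine Prod.ext_iff.mpr ⟨?_, rfl⟩
      rw [hlen]
      push_cast
      ring
    · -- g absent: both sides return (-1, 0)
      have hnone : (PySem.Dict.counter R).get? g = none := by
        rw [PySem.Dict.get?_eq_none_iff_not_mem_keys, PySem.Dict.keys_counter]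
        exact fun hmem => hg ((PySem.Set.mem_ofList R g).mp hmem)
      rw [hnone]
      apply pv_scanA_none
      intro z hz
      have hz' := (PySem.List.mem_sorted _ _ true z).mp hz
      rw [PySem.Dict.items_counter] at hz'
      obtain ⟨k, hk, rfl⟩ := List.mem_map.mp hz'
      intro heq
      exact hg (heq ▸ (PySem.Set.mem_ofList R k).mp hk)
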